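-- pv_equiv track=rewrite | github.com/RamananVr/Leetcodepython | arrays/1907_Count_Salary_Categories.py | count_salary_categories
-- ===== SOURCE A (Python) =====
-- def count_salary_categories(salaries):
--     """
--     Categorizes salaries into low, medium, and high categories and returns their counts.
--
--     Args:
--     salaries (List[int]): A list of integers representing employee salaries.
--
--     Returns:
--     dict: A dictionary with keys "low", "medium", and "high" and their respective counts.
--     """
--     # Initialize counts for each category
--     counts = {"low": 0, "medium": 0, "high": 0}
--
--     # Iterate through the salaries and categorize them
--     for salary in salaries:
--         if salary < 50000:
--             counts["low"] += 1
--         elif 50000 <= salary <= 100000: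
--             counts["medium"] += 1
--         else:
--             counts["high"] += 1
--
--     return counts
-- ===== SOURCE B (Python) =====
-- def count_salary_categories(salaries):
--     low = sum(1 for s in salaries if s < 50000)
--     high = sum(1 for s in salaries if s > 100000)
--     return {"low": low, "medium": len(salaries) - low - high, "high": high}
-- ===== Notes on version B (the rewrite author's own statement) =====
-- stated objective: alternative
-- what changed: Replaces the single 3-way-branch pass that increments a dict with two filtered counting passes (low and high) and derives medium arithmetically as len - low - high.
import Mathlib
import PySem

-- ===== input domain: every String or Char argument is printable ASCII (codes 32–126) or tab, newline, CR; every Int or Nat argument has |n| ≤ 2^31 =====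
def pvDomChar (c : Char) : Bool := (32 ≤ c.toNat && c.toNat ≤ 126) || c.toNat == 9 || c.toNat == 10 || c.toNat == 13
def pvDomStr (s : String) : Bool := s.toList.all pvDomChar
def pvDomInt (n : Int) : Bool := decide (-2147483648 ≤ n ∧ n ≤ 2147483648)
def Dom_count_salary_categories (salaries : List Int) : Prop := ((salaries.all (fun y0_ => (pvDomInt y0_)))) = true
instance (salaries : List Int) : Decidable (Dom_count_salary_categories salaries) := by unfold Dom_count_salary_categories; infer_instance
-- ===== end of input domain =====

-- B counts the low and high buckets with two filtered passes and gets medium by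
-- subtraction, instead of A's single pass with a 3-way branch updating a dict ("alternative").

-- ===== PORT A =====
-- one loop step of A: the 3-way branch incrementing the dict entry
def csc_step (d : PySem.Dict String Int) (salary : Int) : PySem.Dict String Int :=
  if salary < 50000 then d.modify "low" 0 (· + 1)
  else if 50000 ≤ salary ∧ salary ≤ 100000 then d.modify "medium" 0 (· + 1)
  else d.modify "high" 0 (· + 1)

def count_salary_categories (salaries : List Int) : List (String × Int) :=
  (salaries.foldl csc_step (PySem.Dict.ofList [("low", 0), ("medium", 0), ("high", 0)])).items

-- ===== PORT B =====
def count_salary_categories_alt (salaries : List Int) : List (String × Int) :=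
  let low : Int := (salaries.countP (fun s => decide (s < 50000)) : Nat)
  let high : Int := (salaries.countP (fun s => decide (100000 < s)) : Nat)
  [("low", low), ("medium", (salaries.length : Int) - low - high), ("high", high)]

-- ===== PRECONDITION & SPEC =====
def Spec_count_salary_categories (salaries : List Int) (out : List (String × Int)) : Prop := out = count_salary_categories_alt salaries
instance (salaries : List Int) (out : List (String × Int)) : Decidable (Spec_count_salary_categories salaries out) := by unfold Spec_count_salary_categories; infer_instance

-- ===== CLAIM (what is proved, stated in full; the proofs are below) =====
def Claim_equal_count_salary_categories : Prop := ∀ (salaries : List Int), Dom_count_salary_categories salaries → Spec_count_salary_categories salaries (count_salary_categories salaries)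

-- ===== LEMMAS AND PROOFS =====

theorem csc_loop (l : List Int) (a b c : Int) :
    l.foldl csc_step (PySem.Dict.mk [("low", a), ("medium", b), ("high", c)]) =
      PySem.Dict.mk
        [("low", a + (l.countP (fun s => decide (s < 50000)) : Nat)),
         ("medium", b + (l.countP (fun s => decide (50000 ≤ s) && decide (s ≤ 100000)) : Nat)),
         ("high", c + (l.countP (fun s => decide (100000 < s)) : Nat))] := by
  induction l generalizing a b c with
  | nil => simp
  | cons x xs ih =>
    simp only [List.foldl_cons, csc_step, List.countP_cons]
    by_cases h1 : x < 50000
    · simp [h1, PySem.Dict.modify, PySem.Dict.get?, PySem.Dict.getD, PySem.Dict.insert, ih,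
        show ¬(50000 ≤ x ∧ x ≤ 100000) by omega, show ¬(100000 < x) by omega]
      ring
    · by_cases h2 : 50000 ≤ x ∧ x ≤ 100000
      · simp [h1, h2, PySem.Dict.modify, PySem.Dict.get?, PySem.Dict.getD, PySem.Dict.insert, ih,
          show ¬(100000 < x) by omega]
        ring
      · simp [h1, h2, PySem.Dict.modify, PySem.Dict.get?, PySem.Dict.getD, PySem.Dict.insert, ih,
          show 100000 < x by omega]
        ring

theorem csc_count_sum (l : List Int) :
    (l.countP (fun s => decide (s < 50000)) : Int) +
      (l.countP (fun s => decide (50000 ≤ s) && decide (s ≤ 100000)) : Int) +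
      (l.countP (fun s => decide (100000 < s)) : Int) = (l.length : Int) := by
  induction l with
  | nil => simp
  | cons x xs ih =>
    simp only [List.countP_cons, List.length_cons]
    by_cases h1 : x < 50000 <;> by_cases h2 : 50000 ≤ x ∧ x ≤ 100000 <;>
      by_cases h3 : 100000 < x <;> simp [h1, h2, h3] <;> omega

-- ===== VERDICT (by name: the statement is the Claim_ definition above) =====
theorem count_salary_categories_spec : Claim_equal_count_salary_categories := by
  intro salaries _
  unfold Spec_count_salary_categories count_salary_categories count_salary_categories_alt
  rw [show PySem.Dict.ofList [("low", (0:Int)), ("medium", 0), ("high", 0)] =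
        PySem.Dict.mk [("low", (0:Int)), ("medium", 0), ("high", 0)] from by decide,
      csc_loop]
  have h := csc_count_sum salaries
  simp
  omega
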